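-- pv_equiv track=rewrite | github.com/jiyoungzero/codetree-TILs | 241005/Carry 피하기/escaping-carry.py | no_carry_pairs
-- ===== SOURCE A (Python) =====
-- def no_carry_pairs(numbers):
--     from itertools import combinations
--
--     def is_valid_pair(a, b):
--         while a > 0 and b > 0:
--             if (a % 10) + (b % 10) >= 10:
--                 return False
--             a //= 10
--             b //= 10
--         return True
--
--     max_count = 0
--     n = len(numbers)
--     for r in range(1, n + 1):
--         for combo in combinations(numbers, r):
--             valid = True
--             for i in range(r):
--                 for j in range(i + 1, r):
--                     if not is_valid_pair(combo[i], combo[j]):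
--                         valid = False
--                         break
--                 if not valid:
--                     break
--             if valid:
--                 max_count = max(max_count, r)
--
--     return max_count
-- ===== SOURCE B (Python) =====
-- def no_carry_pairs(numbers):
--     def ok(a, b):
--         while a > 0 and b > 0:
--             if (a % 10) + (b % 10) >= 10:
--                 return False
--             a //= 10
--             b //= 10
--         return True
--
--     def go(items, chosen):
--         if not items:
--             return len(chosen)
--         x, rest = items[0], items[1:]
--         best = go(rest, chosen)
--         if all(ok(y, x) for y in chosen):
--             best = max(best, go(rest, chosen + [x]))
--         return best
--
--     return go(numbers, [])
-- ===== Notes on version B (the rewrite author's own statement) =====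
-- stated objective: alternative
-- what changed: A enumerates combinations of every size r and re-checks all pairs of each combination; B does one take/skip recursion over the list that extends the chosen set only when the new element is carry-free against every already-chosen element, so incompatible branches are pruned and no pair is checked twice.
import Mathlib
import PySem

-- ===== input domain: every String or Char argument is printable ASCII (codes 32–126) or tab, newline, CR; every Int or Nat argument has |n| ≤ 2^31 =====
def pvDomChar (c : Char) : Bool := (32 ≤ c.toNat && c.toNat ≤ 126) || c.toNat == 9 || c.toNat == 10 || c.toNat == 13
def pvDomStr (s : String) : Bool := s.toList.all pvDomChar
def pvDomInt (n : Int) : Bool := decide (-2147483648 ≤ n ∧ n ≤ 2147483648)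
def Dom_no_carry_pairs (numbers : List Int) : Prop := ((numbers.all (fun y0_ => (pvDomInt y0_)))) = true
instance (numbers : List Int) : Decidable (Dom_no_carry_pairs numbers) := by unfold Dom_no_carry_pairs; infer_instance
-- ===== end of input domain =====

-- B replaces A's size-by-size enumeration of all combinations (each re-checked over all its pairs)
-- with a pruned take/skip recursion that checks each new element only against the already-chosen ones (both exact; same worst-case exponential cost).

-- ===== PORT A =====
-- while a > 0 and b > 0: … (a //= 10; b //= 10)
def isValidPair (a b : Int) : Bool :=
  if h : 0 < a ∧ 0 < b then
    if PySem.Int.mod a 10 + PySem.Int.mod b 10 ≥ 10 then false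
    else isValidPair (PySem.Int.floordiv a 10) (PySem.Int.floordiv b 10)
  else true
termination_by a.toNat
decreasing_by
  rw [PySem.Int.floordiv_eq_ediv_of_pos (by omega : (0:Int) < 10)]
  omega

-- itertools.combinations(xs, r): all length-r subsequences, elements in list order
def combos : Nat → List Int → List (List Int)
  | 0, _ => [[]]
  | _ + 1, [] => []
  | r + 1, x :: xs => ((combos r xs).map (fun t => x :: t)) ++ combos (r + 1) xs

-- the nested i/j loop with early break: combo[i] is checked against every later combo[j]
def validCombo : List Int → Bool
  | [] => true
  | x :: rest => (rest.all (fun y => isValidPair x y)) && validCombo rest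

def no_carry_pairs (numbers : List Int) : Int :=
  let n := numbers.length
  (PySem.List.pyRange 1 ((n : Int) + 1)).foldl
    (fun max_count r =>
      (combos r.toNat numbers).foldl
        (fun mc combo => if validCombo combo then max mc r else mc) max_count)
    0

-- ===== PORT B =====
def ok (a b : Int) : Bool :=
  if h : 0 < a ∧ 0 < b then
    if PySem.Int.mod a 10 + PySem.Int.mod b 10 ≥ 10 then false
    else ok (PySem.Int.floordiv a 10) (PySem.Int.floordiv b 10)
  else true
termination_by a.toNat
decreasing_by
  rw [PySem.Int.floordiv_eq_ediv_of_pos (by omega : (0:Int) < 10)]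
  omega

def go : List Int → List Int → Int
  | [], chosen => (chosen.length : Int)
  | x :: rest, chosen =>
    let best := go rest chosen
    if chosen.all (fun y => ok y x) then max best (go rest (chosen ++ [x])) else best

def no_carry_pairs_alt (numbers : List Int) : Int := go numbers []

-- ===== PRECONDITION & SPEC =====
def Spec_no_carry_pairs (numbers : List Int) (out : Int) : Prop := out = no_carry_pairs_alt numbers
instance (numbers : List Int) (out : Int) : Decidable (Spec_no_carry_pairs numbers out) := by unfold Spec_no_carry_pairs; infer_instance

-- ===== CLAIM (what is proved, stated in full; the proofs are below) =====
def Claim_equal_no_carry_pairs : Prop := ∀ (numbers : List Int), Dom_no_carry_pairs numbers → Spec_no_carry_pairs numbers (no_carry_pairs numbers)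

-- ===== LEMMAS AND PROOFS =====

theorem ok_eq_isValidPair (a b : Int) : ok a b = isValidPair a b := by
  fun_induction ok a b with
  | case1 a b h h2 => rw [isValidPair, dif_pos h, if_pos h2]
  | case2 a b h h2 ih => rw [isValidPair, dif_pos h, if_neg h2]; exact ih
  | case3 a b h => rw [isValidPair, dif_neg h]

def listMax (l : List Int) : Int := l.foldr max 0

theorem listMax_nonneg (l : List Int) : 0 ≤ listMax l := by
  induction l with
  | nil => simp [listMax]
  | cons x l ih => simp only [listMax, List.foldr_cons] at *; omega

theorem le_listMax {x : Int} {l : List Int} (h : x ∈ l) : x ≤ listMax l := by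
  induction l with
  | nil => simp at h
  | cons y l ih =>
    simp only [listMax, List.foldr_cons] at *
    rcases List.mem_cons.1 h with h | h
    · omega
    · have := ih h; omega

theorem listMax_le {b : Int} {l : List Int} (hb : 0 ≤ b) (h : ∀ x ∈ l, x ≤ b) :
    listMax l ≤ b := by
  induction l with
  | nil => simpa [listMax]
  | cons y l ih =>
    simp only [listMax, List.foldr_cons] at *
    have h1 := h y (by simp)
    have h2 := ih (fun x hx => h x (by simp [hx]))
    omega

theorem foldr_max_init (l : List Int) (e : Int) (he : 0 ≤ e) :
    l.foldr max e = max (listMax l) e := by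
  induction l with
  | nil => simp [listMax]; omega
  | cons x l ih => simp only [listMax, List.foldr_cons] at *; omega

theorem listMax_append (l₁ l₂ : List Int) :
    listMax (l₁ ++ l₂) = max (listMax l₁) (listMax l₂) := by
  simp only [listMax, List.foldr_append]
  exact foldr_max_init l₁ _ (listMax_nonneg l₂)

-- A's inner fold (max over the valid combos, each contributing r)
theorem foldl_if_max {α : Type} (p : α → Bool) (v : Int) :
    ∀ (l : List α) (a : Int), 0 ≤ a →
      l.foldl (fun acc y => if p y then max acc v else acc) a
        = max a (listMax ((l.filter p).map (fun _ => v))) := by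
  intro l
  induction l with
  | nil => intro a ha; simp [listMax]; omega
  | cons y l ih =>
    intro a ha
    by_cases hp : p y
    · simp only [List.foldl_cons, hp, if_pos, List.filter_cons_of_pos hp, List.map_cons]
      rw [ih (max a v) (by omega)]
      have : listMax (v :: (l.filter p).map fun _ => v)
          = max v (listMax ((l.filter p).map fun _ => v)) := by
        simp [listMax]
      omega
    · simp only [List.foldl_cons]
      rw [if_neg hp, List.filter_cons_of_neg (by simpa using hp)]
      exact ih a ha

-- A's outer fold over r
theorem foldl_outer (g : Int → List Int) :
    ∀ (L : List Int) (a : Int), 0 ≤ a →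
      L.foldl (fun acc r => max acc (listMax (g r))) a
        = max a (listMax (L.flatMap g)) := by
  intro L
  induction L with
  | nil => intro a ha; simp [listMax]; omega
  | cons r L ih =>
    intro a ha
    simp only [List.foldl_cons, List.flatMap_cons]
    rw [ih _ (by have := listMax_nonneg (g r); omega), listMax_append]
    omega

theorem combos_mem : ∀ (xs : List Int) (r : Nat) (s : List Int),
    s ∈ combos r xs ↔ s.Sublist xs ∧ s.length = r := by
  intro xs
  induction xs with
  | nil =>
    intro r s
    cases r with
    | zero => simp [combos, List.length_eq_zero_iff]
    | succ r =>
      simp only [combos, List.not_mem_nil, false_iff, not_and]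
      intro hs
      simp [List.sublist_nil.1 hs]
  | cons x xs ih =>
    intro r s
    cases r with
    | zero =>
      simp only [combos, List.mem_singleton]
      constructor
      · rintro rfl; exact ⟨List.nil_sublist _, rfl⟩
      · rintro ⟨_, hl⟩; exact List.length_eq_zero_iff.1 hl
    | succ r =>
      simp only [combos, List.mem_append, List.mem_map, ih, List.sublist_cons_iff]
      constructor
      · rintro (⟨t, ⟨ht, hl⟩, rfl⟩ | ⟨hs, hl⟩)
        · exact ⟨Or.inr ⟨t, rfl, ht⟩, by simp [hl]⟩
        · exact ⟨Or.inl hs, hl⟩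
      · rintro ⟨h | ⟨t, rfl, ht⟩, hl⟩
        · exact Or.inr ⟨h, hl⟩
        · exact Or.inl ⟨t, ⟨ht, by simpa using hl⟩, rfl⟩

-- the value A computes, as a max over a flat list of sizes
theorem A_eq (numbers : List Int) :
    no_carry_pairs numbers
      = listMax ((PySem.List.pyRange 1 ((numbers.length : Int) + 1)).flatMap
          (fun r => ((combos r.toNat numbers).filter validCombo).map (fun _ => r))) := by
  unfold no_carry_pairs
  have hcong :
      (PySem.List.pyRange 1 ((numbers.length : Int) + 1)).foldl
        (fun max_count r =>
          (combos r.toNat numbers).foldl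
            (fun mc combo => if validCombo combo then max mc r else mc) max_count) 0
      = (PySem.List.pyRange 1 ((numbers.length : Int) + 1)).foldl
          (fun acc r => max acc (listMax (((combos r.toNat numbers).filter validCombo).map (fun _ => r)))) 0 := by
    have key : ∀ (L : List Int) (a : Int), 0 ≤ a →
        L.foldl (fun max_count r =>
          (combos r.toNat numbers).foldl
            (fun mc combo => if validCombo combo then max mc r else mc) max_count) a
        = L.foldl (fun acc r => max acc (listMax (((combos r.toNat numbers).filter validCombo).map (fun _ => r)))) a := by
      intro L
      induction L with
      | nil => intro a _; rfl
      | cons r L ih =>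
        intro a ha
        simp only [List.foldl_cons]
        rw [foldl_if_max validCombo r (combos r.toNat numbers) a ha,
          ih _ (by have := listMax_nonneg (((combos r.toNat numbers).filter validCombo).map (fun _ => r)); omega)]
    exact key _ 0 le_rfl
  rw [hcong, foldl_outer _ _ 0 le_rfl]
  have := listMax_nonneg ((PySem.List.pyRange 1 ((numbers.length : Int) + 1)).flatMap
          (fun r => ((combos r.toNat numbers).filter validCombo).map (fun _ => r)))
  omega

-- B-side: validity of a candidate extension, tracking the already-chosen prefix
def pvf : List Int → List Int → Bool
  | _, [] => true
  | chosen, x :: s => (chosen.all (fun y => ok y x)) && pvf (chosen ++ [x]) s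

theorem all_and {α : Type} (l : List α) (p q : α → Bool) :
    l.all (fun x => p x && q x) = (l.all p && l.all q) := by
  induction l with
  | nil => rfl
  | cons x l ih =>
    simp only [List.all_cons, ih]
    cases p x <;> cases q x <;> cases l.all p <;> cases l.all q <;> rfl

theorem pvf_general : ∀ (s chosen : List Int),
    pvf chosen s = (s.all (fun z => chosen.all (fun y => ok y z)) && pvf [] s) := by
  intro s
  induction s with
  | nil => intro chosen; simp [pvf]
  | cons x s ih =>
    intro chosen
    simp only [pvf, List.all_cons]
    rw [ih (chosen ++ [x])]
    simp only [List.nil_append]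
    rw [ih [x]]
    simp only [List.all_append, List.all_cons, List.all_nil, Bool.and_true]
    rw [all_and s (fun z => chosen.all fun y => ok y z) (fun z => ok x z)]
    cases chosen.all (fun y => ok y x) <;> cases s.all (fun z => chosen.all fun y => ok y z) <;>
      cases s.all (fun z => ok x z) <;> cases pvf [] s <;> rfl

theorem pvf_nil_eq : ∀ (s : List Int), pvf [] s = validCombo s := by
  intro s
  induction s with
  | nil => rfl
  | cons x s ih =>
    have h1 : pvf [] (x :: s) = pvf [x] s := by simp [pvf]
    rw [h1, pvf_general s [x], ih, validCombo]
    simp [ok_eq_isValidPair]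

theorem go_eq : ∀ (rest chosen : List Int),
    go rest chosen
      = listMax (((rest.sublists').filter (pvf chosen)).map
          (fun s => (chosen.length : Int) + (s.length : Int))) := by
  intro rest
  induction rest with
  | nil =>
    intro chosen
    simp [go, List.sublists', listMax, pvf]
  | cons x rest ih =>
    intro chosen
    rw [List.sublists'_cons]
    simp only [List.filter_append, List.map_append, listMax_append, List.filter_map]
    by_cases hc : chosen.all (fun y => ok y x)
    · have hfilter : (List.filter (pvf chosen ∘ List.cons x) rest.sublists')
          = List.filter (pvf (chosen ++ [x])) rest.sublists' := by
        apply List.filter_congr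
        intro s _
        show pvf chosen (x :: s) = _
        simp [pvf, hc]
      rw [hfilter]
      have hmap : (List.map (fun s => (chosen.length : Int) + (s.length : Int))
            (List.map (List.cons x) (List.filter (pvf (chosen ++ [x])) rest.sublists')))
          = List.map (fun s => ((chosen ++ [x]).length : Int) + (s.length : Int))
              (List.filter (pvf (chosen ++ [x])) rest.sublists') := by
        rw [List.map_map]
        apply List.map_congr_left
        intro s _
        simp
        omega
      rw [hmap, ← ih chosen, ← ih (chosen ++ [x])]
      show go (x :: rest) chosen = _
      simp [go, hc]
    · have hfilter : (List.filter (pvf chosen ∘ List.cons x) rest.sublists') = [] := by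
        rw [List.filter_eq_nil_iff]
        intro s _
        show ¬ pvf chosen (x :: s) = true
        simp [pvf, hc]
      rw [hfilter]
      simp only [List.map_nil]
      rw [← ih chosen]
      show go (x :: rest) chosen = _
      simp only [go, hc, if_neg, Bool.false_eq_true, not_false_eq_true]
      have : listMax ([] : List Int) = 0 := rfl
      rw [this]
      have h0 : 0 ≤ go rest chosen := by
        rw [ih chosen]; exact listMax_nonneg _
      omega

theorem B_eq (numbers : List Int) :
    no_carry_pairs_alt numbers
      = listMax (((numbers.sublists').filter validCombo).map (fun s => (s.length : Int))) := by
  unfold no_carry_pairs_alt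
  rw [go_eq]
  congr 1
  have : List.filter (pvf []) numbers.sublists' = List.filter validCombo numbers.sublists' := by
    apply List.filter_congr; intro s _; exact pvf_nil_eq s
  rw [this]
  apply List.map_congr_left
  intro s _
  simp

-- ===== VERDICT (by name: the statement is the Claim_ definition above) =====
theorem no_carry_pairs_spec : Claim_equal_no_carry_pairs := by
  intro numbers _
  show no_carry_pairs numbers = no_carry_pairs_alt numbers
  rw [A_eq, B_eq]
  apply le_antisymm
  · apply listMax_le (listMax_nonneg _)
    intro x hx
    simp only [List.mem_flatMap, List.mem_map, List.mem_filter] at hx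
    obtain ⟨r, hr, s, ⟨hsc, hsv⟩, rfl⟩ := hx
    rw [PySem.List.mem_pyRange_one] at hr
    obtain ⟨hsub, hlen⟩ := (combos_mem numbers r.toNat s).1 hsc
    have hx : (s.length : Int) = r := by omega
    apply le_listMax
    simp only [List.mem_map, List.mem_filter]
    exact ⟨s, ⟨List.mem_sublists'.2 hsub, hsv⟩, hx⟩
  · apply listMax_le (listMax_nonneg _)
    intro x hx
    simp only [List.mem_map, List.mem_filter] at hx
    obtain ⟨s, ⟨hss, hsv⟩, rfl⟩ := hx
    have hsub := List.mem_sublists'.1 hss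
    rcases Nat.eq_zero_or_pos s.length with h0 | h0
    · simp [h0]; exact listMax_nonneg _
    · apply le_listMax
      simp only [List.mem_flatMap, List.mem_map, List.mem_filter]
      refine ⟨(s.length : Int), ?_, s, ⟨?_, hsv⟩, rfl⟩
      · rw [PySem.List.mem_pyRange_one]
        have := hsub.length_le
        omega
      · exact (combos_mem numbers _ s).2 ⟨hsub, by simp⟩
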